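-- pv_equiv track=rewrite | github.com/NicolasFive/VideoTingYi | src/utils.py | split_into_n_segments_int
-- ===== SOURCE A (Python) =====
-- def split_into_n_segments_int(start, end, n):
--     """
--     将区间分割成n个段，使用整数边界
--
--     Args:
--         start: 起始值（整数）
--         end: 结束值（整数）
--         n: 分割段数
--
--     Returns:
--         list: 分割后的区间列表，使用整数边界
--     """
--     total_length = end - start
--     base_length = total_length // n  # 基本长度
--     remainder = total_length % n  # 余数
--
--     intervals = []
--     current = start
--
--     for i in range(n):
--         # 前remainder个段长度加1
--         length = base_length + 1 if i < remainder else base_length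
--         next_point = current + length
--
--         # 最后一段确保到end
--         if i == n - 1:
--             intervals.append([current, end])
--         else:
--             intervals.append([current, next_point])
--
--         current = next_point
--
--     return intervals
-- ===== SOURCE B (Python) =====
-- def split_into_n_segments_int(start, end, n):
--     total = end - start
--     base = total // n
--     remainder = total % n
--     b = [start + k * base + min(k, remainder) for k in range(n + 1)]
--     return [[b[k], b[k + 1]] for k in range(n)]
-- ===== Notes on version B (the rewrite author's own statement) =====
-- stated objective: simpler
-- what changed: Replaces the running accumulator loop with its last-iteration special case by a closed-form boundary list b[k] = start + k*base + min(k, remainder) and pairing adjacent boundaries.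
import Mathlib
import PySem

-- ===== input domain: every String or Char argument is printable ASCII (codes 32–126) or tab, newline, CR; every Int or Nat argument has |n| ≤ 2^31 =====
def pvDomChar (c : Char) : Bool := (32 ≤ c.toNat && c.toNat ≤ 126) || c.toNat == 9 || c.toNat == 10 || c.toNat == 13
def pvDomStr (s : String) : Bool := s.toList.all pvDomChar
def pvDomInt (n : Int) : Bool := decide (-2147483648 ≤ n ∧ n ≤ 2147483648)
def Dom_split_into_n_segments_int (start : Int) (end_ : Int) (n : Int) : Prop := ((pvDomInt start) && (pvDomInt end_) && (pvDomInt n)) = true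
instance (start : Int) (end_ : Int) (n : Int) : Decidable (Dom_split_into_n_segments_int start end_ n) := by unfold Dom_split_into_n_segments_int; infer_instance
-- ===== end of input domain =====

-- B replaces A's running accumulator (with its last-iteration special case) by a
-- closed-form boundary list and pairing of adjacent boundaries (objective: simpler).

-- ===== PORT A =====
def split_into_n_segments_int (start : Int) (end_ : Int) (n : Int) : List (List Int) :=
  let total_length := end_ - start
  let base_length := PySem.Int.floordiv total_length n
  let remainder := PySem.Int.mod total_length n
  let st := (PySem.List.pyRange 0 n 1).foldl
    (fun (st : List (List Int) × Int) i =>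
      let length := if i < remainder then base_length + 1 else base_length
      let next_point := st.2 + length
      let intervals := if i = n - 1 then st.1 ++ [[st.2, end_]] else st.1 ++ [[st.2, next_point]]
      (intervals, next_point))
    ([], start)
  st.1

-- ===== PORT B =====
def split_into_n_segments_int_alt (start : Int) (end_ : Int) (n : Int) : List (List Int) :=
  let total := end_ - start
  let base := PySem.Int.floordiv total n
  let remainder := PySem.Int.mod total n
  let b := (PySem.List.pyRange 0 (n + 1) 1).map (fun k => start + k * base + min k remainder)
  (PySem.List.pyRange 0 n 1).map
    (fun k => [PySem.List.pyGetD b k 0, PySem.List.pyGetD b (k + 1) 0])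

-- ===== PRECONDITION & SPEC =====
-- Python A raises ZeroDivisionError exactly when n = 0 (total // n); Pre_ excludes only that.
def Pre_split_into_n_segments_int (start : Int) (end_ : Int) (n : Int) : Prop := n ≠ 0
instance (start : Int) (end_ : Int) (n : Int) : Decidable (Pre_split_into_n_segments_int start end_ n) := by unfold Pre_split_into_n_segments_int; infer_instance
def pvWitness_split_into_n_segments_int : Int × Int × Int := (0, 10, 3)

def Spec_split_into_n_segments_int (start : Int) (end_ : Int) (n : Int) (out : List (List Int)) : Prop := out = split_into_n_segments_int_alt start end_ n
instance (start : Int) (end_ : Int) (n : Int) (out : List (List Int)) : Decidable (Spec_split_into_n_segments_int start end_ n out) := by unfold Spec_split_into_n_segments_int; infer_instance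

-- ===== CLAIM (what is proved, stated in full; the proofs are below) =====
def Claim_equal_split_into_n_segments_int : Prop := ∀ (start : Int) (end_ : Int) (n : Int), Dom_split_into_n_segments_int start end_ n → Pre_split_into_n_segments_int start end_ n → Spec_split_into_n_segments_int start end_ n (split_into_n_segments_int start end_ n)

-- ===== LEMMAS AND PROOFS =====

-- the boundary function shared by the analysis of both ports
def pvBound (start base r k : Int) : Int := start + k * base + min k r

-- A's loop, starting at index a with current = pvBound a, produces the boundary pairs.
theorem pvLoopA (start end_ n base r : Int)
    (hid : base * n + r = end_ - start) (h0r : 0 ≤ r) (hrn : r < n) :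
    ∀ (m : Nat) (a : Int), (n - a).toNat = m → 0 ≤ a → a ≤ n →
    ∀ acc : List (List Int),
      ((PySem.List.pyRange a n 1).foldl
        (fun (st : List (List Int) × Int) i =>
          (if i = n - 1 then st.1 ++ [[st.2, end_]]
           else st.1 ++ [[st.2, st.2 + if i < r then base + 1 else base]],
           st.2 + if i < r then base + 1 else base))
        (acc, pvBound start base r a)).1
      = acc ++ (PySem.List.pyRange a n 1).map
          (fun k => [pvBound start base r k, pvBound start base r (k+1)]) := by
  have hend : pvBound start base r n = end_ := by
    unfold pvBound
    have : min n r = r := by omega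
    rw [this]; linarith [hid]
  intro m
  induction m with
  | zero =>
    intro a hm h0 hn acc
    have ha : n ≤ a := by omega
    rw [PySem.List.pyRange_one_eq_nil ha]
    simp
  | succ m ih =>
    intro a hm h0 hn acc
    have ha : a < n := by omega
    rw [PySem.List.pyRange_one_cons ha]
    simp only [List.foldl_cons, List.map_cons]
    have hnext : pvBound start base r a + (if a < r then base + 1 else base)
        = pvBound start base r (a + 1) := by
      unfold pvBound
      by_cases h : a < r
      · simp only [if_pos h]
        have h1 : min a r = a := by omega
        have h2 : min (a + 1) r = a + 1 := by omega
        rw [h1, h2]; ring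
      · simp only [if_neg h]
        have h1 : min a r = r := by omega
        have h2 : min (a + 1) r = r := by omega
        rw [h1, h2]; ring
    have hseg : (if a = n - 1 then acc ++ [[pvBound start base r a, end_]]
          else acc ++ [[pvBound start base r a, pvBound start base r (a + 1)]])
        = acc ++ [[pvBound start base r a, pvBound start base r (a + 1)]] := by
      by_cases h : a = n - 1
      · rw [if_pos h]
        have h1 : a + 1 = n := by omega
        rw [h1, hend]
      · rw [if_neg h]
    rw [show pvBound start base r a + (if a < r then base + 1 else base)
        = pvBound start base r (a + 1) from hnext] at *
    rw [hseg, ih (a + 1) (by omega) (by omega) (by omega)]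
    simp

-- ===== VERDICT (by name: the statement is the Claim_ definition above) =====
theorem split_into_n_segments_int_spec : Claim_equal_split_into_n_segments_int := by
  intro start end_ n _ hpre
  unfold Spec_split_into_n_segments_int split_into_n_segments_int split_into_n_segments_int_alt
  dsimp only
  by_cases hn : n ≤ 0
  · rw [PySem.List.pyRange_one_eq_nil hn]
    simp
  · have hn : 0 < n := by omega
    set base := PySem.Int.floordiv (end_ - start) n with hbase
    set r := PySem.Int.mod (end_ - start) n with hr
    have hid : base * n + r = end_ - start := PySem.Int.floordiv_mul_add_mod _ _
    have h0r : 0 ≤ r := PySem.Int.mod_nonneg _ hn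
    have hrn : r < n := PySem.Int.mod_lt _ hn
    have hmap : (PySem.List.pyRange 0 n 1).map
        (fun k => [PySem.List.pyGetD ((PySem.List.pyRange 0 (n + 1) 1).map (fun k => start + k * base + min k r)) k 0,
                   PySem.List.pyGetD ((PySem.List.pyRange 0 (n + 1) 1).map (fun k => start + k * base + min k r)) (k + 1) 0])
        = (PySem.List.pyRange 0 n 1).map
          (fun k => [pvBound start base r k, pvBound start base r (k + 1)]) := by
      apply List.map_congr_left
      intro k hk
      rw [PySem.List.mem_pyRange_one] at hk
      rw [PySem.List.pyGetD_map_pyRange_of_nonneg _ _ _ _ hk.1 (by omega),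
          PySem.List.pyGetD_map_pyRange_of_nonneg _ _ _ _ (by omega) (by omega)]
      rfl
    rw [hmap]
    have hstart : start = pvBound start base r 0 := by
      unfold pvBound; simp [min_eq_left h0r]
    have hmain := pvLoopA start end_ n base r hid h0r hrn (n - 0).toNat 0 rfl le_rfl (by omega) []
    rw [show pvBound start base r 0 = start from hstart.symm] at hmain
    simpa using hmain
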